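-- pv_equiv track=rewrite | github.com/jm55/Airhound | utils/utils.py | find_iterations
-- ===== SOURCE A (Python) =====
-- def find_iterations(charset, min, max):
--     iterations = 0
--     if min == max:
--         return pow(len(charset),min)
--     while min <= max:
--         iterations += pow(len(charset),min)
--         min += 1
--     return iterations
-- ===== SOURCE B (Python) =====
-- def find_iterations(charset, min, max):
--     if min > max:
--         return 0
--     c = len(charset)
--     if c == 1:
--         return max - min + 1
--     return (pow(c, max + 1) - pow(c, min)) // (c - 1)
-- ===== Notes on version B (the rewrite author's own statement) =====
-- stated objective: alternative
-- what changed: Replaced A's per-exponent loop summing pow(len(charset), i) for i in min..max by the closed-form geometric series (c^(max+1) - c^min) // (c-1), with the c == 1 case as a direct count.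
-- outside the precondition, e.g. on find_iterations('ab', -1, 2): A returns 7.5, B returns 7.0; on find_iterations('', -1, -1): A raises ZeroDivisionError, B raises ZeroDivisionError
import Mathlib
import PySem

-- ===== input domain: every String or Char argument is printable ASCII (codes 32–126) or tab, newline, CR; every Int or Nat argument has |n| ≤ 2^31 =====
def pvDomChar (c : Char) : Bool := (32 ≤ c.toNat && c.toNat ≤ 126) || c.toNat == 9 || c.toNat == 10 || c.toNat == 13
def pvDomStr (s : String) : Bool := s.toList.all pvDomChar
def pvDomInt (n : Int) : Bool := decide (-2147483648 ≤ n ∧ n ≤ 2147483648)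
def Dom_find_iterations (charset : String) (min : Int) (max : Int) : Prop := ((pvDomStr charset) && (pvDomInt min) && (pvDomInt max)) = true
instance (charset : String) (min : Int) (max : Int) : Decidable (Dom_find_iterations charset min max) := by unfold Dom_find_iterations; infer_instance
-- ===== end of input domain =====

-- B replaces A's per-exponent loop of big-int pows by the closed-form geometric series
-- (c^(max+1) - c^min) // (c-1), special-casing len(charset) == 1 (objective: alternative).

-- ===== PORT A =====
-- the while loop of A: while min <= max: iterations += pow(len(charset), min); min += 1
def fiLoop (c : Int) (min max acc : Int) : Int :=
  if min ≤ max then fiLoop c (min + 1) max (acc + c ^ min.toNat) else acc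
termination_by (max + 1 - min).toNat
decreasing_by omega

def find_iterations (charset : String) (min : Int) (max : Int) : Int :=
  let c := PySem.Str.len charset
  if min = max then c ^ min.toNat
  else fiLoop c min max 0

-- ===== PORT B =====
def find_iterations_alt (charset : String) (min : Int) (max : Int) : Int :=
  if min > max then 0
  else
    let c := PySem.Str.len charset
    if c = 1 then max - min + 1
    else PySem.Int.floordiv (c ^ (max + 1).toNat - c ^ min.toNat) (c - 1)

-- ===== PRECONDITION & SPEC =====
-- Pre_ excludes min < 0 with min ≤ max: there Python's pow(·, negative) makes A return a
-- float (not an int of the declared type) or raise ZeroDivisionError on an empty charset.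
def Pre_find_iterations (charset : String) (min : Int) (max : Int) : Prop :=
  0 ≤ min ∨ max < min
instance (charset : String) (min : Int) (max : Int) : Decidable (Pre_find_iterations charset min max) := by unfold Pre_find_iterations; infer_instance

def pvWitness_find_iterations : String × Int × Int := ("ab", 1, 3)

def Spec_find_iterations (charset : String) (min : Int) (max : Int) (out : Int) : Prop := out = find_iterations_alt charset min max
instance (charset : String) (min : Int) (max : Int) (out : Int) : Decidable (Spec_find_iterations charset min max out) := by unfold Spec_find_iterations; infer_instance

-- ===== CLAIM (what is proved, stated in full; the proofs are below) =====
def Claim_equal_find_iterations : Prop := ∀ (charset : String) (min : Int) (max : Int), Dom_find_iterations charset min max → Pre_find_iterations charset min max → Spec_find_iterations charset min max (find_iterations charset min max)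

-- ===== LEMMAS AND PROOFS =====

-- the geometric sum c^m + c^(m+1) + … + c^(m+n-1)
def geomS (c : Int) (m n : Nat) : Int := ((List.range n).map (fun i => c ^ (m + i))).sum

theorem geomS_succ (c : Int) (m n : Nat) :
    geomS c m (n + 1) = c ^ m + geomS c (m + 1) n := by
  unfold geomS
  rw [List.range_succ_eq_map, List.map_cons, List.sum_cons, List.map_map]
  have hf : ((fun i => c ^ (m + i)) ∘ Nat.succ) = fun i => c ^ (m + 1 + i) := by
    funext i; simp only [Function.comp]; congr 1; omega
  rw [hf]
  simp

theorem fiLoop_eq (c : Int) (max : Int) :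
    ∀ (n : Nat) (min acc : Int), 0 ≤ min → (max + 1 - min).toNat = n →
      fiLoop c min max acc = acc + geomS c min.toNat n := by
  intro n
  induction n with
  | zero =>
    intro min acc hm hn
    rw [fiLoop]
    have : ¬ min ≤ max := by omega
    simp [this, geomS]
  | succ k ih =>
    intro min acc hm hn
    rw [fiLoop]
    have hle : min ≤ max := by omega
    simp only [hle, if_pos]
    rw [ih (min + 1) (acc + c ^ min.toNat) (by omega) (by omega)]
    have : (min + 1).toNat = min.toNat + 1 := by omega
    rw [this, geomS_succ]
    ring

theorem geomS_mul (c : Int) (m n : Nat) :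
    (c - 1) * geomS c m n = c ^ (m + n) - c ^ m := by
  induction n with
  | zero => simp [geomS]
  | succ k ih =>
    unfold geomS at *
    rw [List.range_succ]
    simp only [List.map_append, List.sum_append, List.map, List.sum_cons, List.sum_nil]
    rw [mul_add, ih]
    have : c ^ (m + (k + 1)) = c * c ^ (m + k) := by ring
    rw [this]; ring

theorem geomS_one (m n : Nat) : geomS 1 m n = n := by
  unfold geomS
  induction n with
  | zero => simp
  | succ k ih =>
    rw [List.range_succ]
    simp only [List.map_append, List.sum_append, List.map, List.sum_cons, List.sum_nil, one_pow] at *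
    omega

theorem floordiv_mul_cancel (b q : Int) (hb : b ≠ 0) :
    PySem.Int.floordiv (b * q) b = q := by
  have h1 := PySem.Int.floordiv_mul_add_mod (b * q) b
  have h2 : PySem.Int.mod (b * q) b = 0 := by
    rw [PySem.Int.mod_eq_zero_iff_dvd]
    exact ⟨q, rfl⟩
  rw [h2, add_zero] at h1
  have h3 : PySem.Int.floordiv (b * q) b * b = q * b := by rw [h1]; ring
  exact mul_right_cancel₀ hb h3

-- ===== VERDICT (by name: the statement is the Claim_ definition above) =====
theorem find_iterations_spec : Claim_equal_find_iterations := by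
  intro charset min max _ hpre
  unfold Spec_find_iterations find_iterations find_iterations_alt
  set c := PySem.Str.len charset with hc
  rcases hpre with hm | hgt
  · -- 0 ≤ min
    by_cases hle : min > max
    · -- min > max: A's min = max branch is impossible; loop returns acc = 0
      have hne : min ≠ max := by omega
      simp only [hne, if_neg, hle, if_pos, not_false_iff]
      rw [fiLoop]
      have : ¬ min ≤ max := by omega
      simp [this]
    · -- min ≤ max
      rw [not_lt] at hle
      have hn : (max + 1 - min).toNat = (max + 1 - min).toNat := rfl
      have hA : fiLoop c min max 0 = geomS c min.toNat (max + 1 - min).toNat := by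
        rw [fiLoop_eq c max _ min 0 hm rfl]; ring
      have hkey : geomS c min.toNat (max + 1 - min).toNat =
          (if c = 1 then max - min + 1
           else PySem.Int.floordiv (c ^ (max + 1).toNat - c ^ min.toNat) (c - 1)) := by
        by_cases h1 : c = 1
        · simp only [h1, if_pos]
          rw [geomS_one]; omega
        · simp only [h1, if_neg, not_false_iff]
          have hmul := geomS_mul c min.toNat (max + 1 - min).toNat
          have hexp : min.toNat + (max + 1 - min).toNat = (max + 1).toNat := by omega
          rw [hexp] at hmul
          have hb : c - 1 ≠ 0 := by intro h; apply h1; omega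
          calc geomS c min.toNat (max + 1 - min).toNat
              = PySem.Int.floordiv ((c - 1) * geomS c min.toNat (max + 1 - min).toNat) (c - 1) :=
                (floordiv_mul_cancel _ _ hb).symm
            _ = PySem.Int.floordiv (c ^ (max + 1).toNat - c ^ min.toNat) (c - 1) := by rw [hmul]
      by_cases heq : min = max
      · -- A returns c ^ min.toNat directly
        subst heq
        simp only [gt_iff_lt, lt_self_iff_false, if_false]
        rw [← hkey, show (min + 1 - min).toNat = 1 from by omega]
        unfold geomS; simp
      · simp only [heq, if_neg, not_false_iff, not_lt.mpr hle]
        rw [hA, hkey]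
  · -- max < min: loop not entered, both return 0
    have hne : min ≠ max := by omega
    simp only [hne, if_neg, not_false_iff, hgt, if_pos]
    rw [fiLoop]
    have : ¬ min ≤ max := by omega
    simp [this]
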